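-- pv_equiv track=rewrite | github.com/jizhuoran/caffe-huawei-atlas-convertor | convertor/huawei/impl/strided_slice_grad_d.py | _update_begin_end
-- ===== SOURCE A (Python) =====
-- def _update_begin_end(input_shape, begin, end, begin_mask, end_mask):
--     """ Calculate the value of padding by input parameters.
--
--     Parameters
--     ----------
--     input_shape: list or tuple.
--         shape of input.
--     begin: list or tuple.
--         represents the index of the first value to select.
--     end: list or tuple.
--         represents the index of the last value to select.
--     begin_mask: int
--         a bit mask where a bit i being 1 means to ignore the begin value and instead use the
--         largest interval possible.
--     end_mask: int
--         analogous to `begin_mask`.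
--
--     Returns
--     -------
--     begin_shape: list.
--         shape of 'begin' after mask handle
--     end_shape: list.
--         shape of 'end' after mask handle
--     """
--     begin_shape = list(begin)
--     end_shape = list(end)
--
--     if end_shape[-1] > input_shape[-1]:
--         end_shape[-1] = input_shape[-1]
--
--     # If the ith bit of begin_mask is set, begin[i] is ignored,
--     # and the fullest possible range in that dimension is used instead.
--     # end_mask works analogously, except with the end range.
--     for i, _ in enumerate(zip(input_shape, begin_shape, end_shape)):
--         # process begin_mask
--         if (begin_mask & 2**i) == 2**i:
--             begin_shape[i] = 0
--         # process end_mask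
--         if (end_mask & 2**i) == 2**i:
--             end_shape[i] = input_shape[i]
--
--     return begin_shape, end_shape
-- ===== SOURCE B (Python) =====
-- def _update_begin_end(input_shape, begin, end, begin_mask, end_mask):
--     begin_shape = list(begin)
--     end_shape = list(end)
--     if end_shape[-1] > input_shape[-1]:
--         end_shape[-1] = input_shape[-1]
--     n = min(len(input_shape), len(begin_shape), len(end_shape))
--     # walk only the SET bits of each mask (restricted to the first n bits),
--     # peeling the highest set bit each step, instead of testing every dimension
--     m = begin_mask & ((1 << n) - 1)
--     while m:
--         i = m.bit_length() - 1
--         begin_shape[i] = 0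
--         m -= 1 << i
--     m = end_mask & ((1 << n) - 1)
--     while m:
--         i = m.bit_length() - 1
--         end_shape[i] = input_shape[i]
--         m -= 1 << i
--     return begin_shape, end_shape
-- ===== Notes on version B (the rewrite author's own statement) =====
-- stated objective: alternative
-- what changed: Replaces A's dense loop over every dimension (testing begin_mask & 2**i and end_mask & 2**i per index) with a sparse walk over only the SET bits of each mask restricted to the first n bits: each step extracts the highest set bit via bit_length, updates that single index, and clears the bit, so work is proportional to the popcount of the masks rather than the number of dimensions.
import Mathlib
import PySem

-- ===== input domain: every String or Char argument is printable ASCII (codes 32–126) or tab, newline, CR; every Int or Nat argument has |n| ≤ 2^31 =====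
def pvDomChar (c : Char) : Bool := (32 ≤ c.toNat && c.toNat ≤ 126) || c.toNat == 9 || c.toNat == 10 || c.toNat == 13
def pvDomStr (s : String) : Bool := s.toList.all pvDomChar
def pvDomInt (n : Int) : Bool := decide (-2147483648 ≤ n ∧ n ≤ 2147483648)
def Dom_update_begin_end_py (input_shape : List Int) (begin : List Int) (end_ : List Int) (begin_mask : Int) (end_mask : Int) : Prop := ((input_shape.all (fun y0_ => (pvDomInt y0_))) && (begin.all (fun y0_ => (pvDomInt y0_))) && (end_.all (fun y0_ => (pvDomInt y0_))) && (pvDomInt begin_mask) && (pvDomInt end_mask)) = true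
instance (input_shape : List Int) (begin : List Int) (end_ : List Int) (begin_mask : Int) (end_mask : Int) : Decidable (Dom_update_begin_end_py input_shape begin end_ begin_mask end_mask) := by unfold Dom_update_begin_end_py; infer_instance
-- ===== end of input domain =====

-- B replaces A's dense per-dimension loop (testing begin_mask & 2**i and end_mask & 2**i for every
-- i) by a sparse walk over only the SET bits of each mask restricted to its first n bits: peel the
-- highest set bit via bit_length, update that single index, clear the bit (objective: alternative).

-- ===== PORT A =====
-- transliteration of _update_begin_end: list copies, the end_shape[-1] clamp, then the
-- enumerate(zip(...)) loop mutating begin_shape/end_shape.  end_shape[-1] = v is ported as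
-- dropLast ++ [v] and the xs[-1] / input_shape[i] reads via pyGetD / getD — exact on nonempty
-- lists / in-range i (Pre_ excludes the IndexError cases, and i < n keeps getD in range).
def update_begin_end_py (input_shape : List Int) (begin : List Int) (end_ : List Int) (begin_mask : Int) (end_mask : Int) : List Int × List Int :=
  let begin_shape := begin
  let end_shape := end_
  let end_shape :=
    if PySem.List.pyGetD end_shape (-1) 0 > PySem.List.pyGetD input_shape (-1) 0 then
      end_shape.dropLast ++ [PySem.List.pyGetD input_shape (-1) 0]
    else end_shape
  let n := min (min input_shape.length begin_shape.length) end_shape.length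
  (List.range n).foldl
    (fun st i =>
      (if PySem.Int.band begin_mask ((2 : Int) ^ i) = (2 : Int) ^ i then st.1.set i 0 else st.1,
       if PySem.Int.band end_mask ((2 : Int) ^ i) = (2 : Int) ^ i then st.2.set i (input_shape.getD i 0) else st.2))
    (begin_shape, end_shape)

-- ===== PORT B =====
-- Source B's shared while-loop shape 'while m: i = m.bit_length() - 1; l[i] = v(i); m -= 1 << i',
-- with the loop body's update passed as v.  m is a Nat (Source B masks with (1 << n) - 1 ≥ 0);
-- Python's m.bit_length() on m > 0 is PySem.Int.bitLength m, and 1 << i is 2 ^ i — exact.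
def pvBitWalk (v : Nat → Int) (m : Nat) (l : List Int) : List Int :=
  if h : m = 0 then l
  else
    let i := PySem.Int.bitLength (m : Int) - 1
    pvBitWalk v (m - 2 ^ i) (l.set i (v i))
  termination_by m
  decreasing_by
    have h1 := PySem.Int.two_pow_bitLength_le (m : Int) (by exact_mod_cast h)
    rw [Int.natAbs_natCast] at h1
    have h2 : 0 < 2 ^ (PySem.Int.bitLength (m : Int) - 1) := Nat.two_pow_pos _
    omega

-- transliteration of Source B's _update_begin_end: the copies and the end_shape[-1] clamp as in A,
-- n = min of the three lengths, then the two bit walks.  begin_mask & ((1 << n) - 1) is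
-- PySem.Int.band begin_mask (2^n - 1); it is ≥ 0, so .toNat is exact.
def update_begin_end_py_alt (input_shape : List Int) (begin : List Int) (end_ : List Int) (begin_mask : Int) (end_mask : Int) : List Int × List Int :=
  let begin_shape := begin
  let end_shape :=
    if PySem.List.pyGetD end_ (-1) 0 > PySem.List.pyGetD input_shape (-1) 0 then
      end_.dropLast ++ [PySem.List.pyGetD input_shape (-1) 0]
    else end_
  let n := min (min input_shape.length begin_shape.length) end_shape.length
  let mb := (PySem.Int.band begin_mask ((2 : Int) ^ n - 1)).toNat
  let me := (PySem.Int.band end_mask ((2 : Int) ^ n - 1)).toNat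
  (pvBitWalk (fun _ => 0) mb begin_shape,
   pvBitWalk (fun i => input_shape.getD i 0) me end_shape)

-- ===== PRECONDITION & SPEC =====
-- Pre_ excludes exactly the inputs on which the Python A raises IndexError: the end_shape[-1] /
-- input_shape[-1] reads need both lists nonempty (B raises there too).
def Pre_update_begin_end_py (input_shape : List Int) (begin : List Int) (end_ : List Int) (begin_mask : Int) (end_mask : Int) : Prop :=
  input_shape ≠ [] ∧ end_ ≠ []
instance (input_shape : List Int) (begin : List Int) (end_ : List Int) (begin_mask : Int) (end_mask : Int) : Decidable (Pre_update_begin_end_py input_shape begin end_ begin_mask end_mask) := by unfold Pre_update_begin_end_py; infer_instance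

def pvWitness_update_begin_end_py : List Int × List Int × List Int × Int × Int :=
  ([4, 5, 6], [1, 2, 3], [3, 9, 2], 5, 2)

def Spec_update_begin_end_py (input_shape : List Int) (begin : List Int) (end_ : List Int) (begin_mask : Int) (end_mask : Int) (out : List Int × List Int) : Prop := out = update_begin_end_py_alt input_shape begin end_ begin_mask end_mask
instance (input_shape : List Int) (begin : List Int) (end_ : List Int) (begin_mask : Int) (end_mask : Int) (out : List Int × List Int) : Decidable (Spec_update_begin_end_py input_shape begin end_ begin_mask end_mask out) := by unfold Spec_update_begin_end_py; infer_instance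

-- ===== CLAIM (what is proved, stated in full; the proofs are below) =====
def Claim_equal_update_begin_end_py : Prop := ∀ (input_shape : List Int) (begin : List Int) (end_ : List Int) (begin_mask : Int) (end_mask : Int), Dom_update_begin_end_py input_shape begin end_ begin_mask end_mask → Pre_update_begin_end_py input_shape begin end_ begin_mask end_mask → Spec_update_begin_end_py input_shape begin end_ begin_mask end_mask (update_begin_end_py input_shape begin end_ begin_mask end_mask)

-- ===== LEMMAS AND PROOFS =====

theorem nat_and_two_pow_eq (a k : Nat) : (a &&& 2 ^ k = 2 ^ k) ↔ a.testBit k := by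
  have hp : 0 < 2 ^ k := Nat.two_pow_pos k
  rw [Nat.and_two_pow]
  cases h : a.testBit k <;> simp <;> omega

-- characterisation of A's per-dimension bit test, by the sign of the mask
theorem band_two_pow_iff (m : Int) (k : Nat) :
    (PySem.Int.band m ((2 : Int) ^ k) = 2 ^ k) ↔
      (if 0 ≤ m then m.toNat.testBit k else ¬ (-m - 1).toNat.testBit k) := by
  have h2 : ((2 : Int) ^ k) = ((2 ^ k : Nat) : Int) := by push_cast; ring
  by_cases hm : 0 ≤ m
  · rw [if_pos hm, show m = ((m.toNat : Int)) by omega, h2, PySem.Int.band_natCast,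
      Int.ofNat_inj]
    exact nat_and_two_pow_eq _ _
  · have hb : (0 : Int) ≤ 2 ^ k := by positivity
    rw [if_neg hm, PySem.Int.band, if_neg hm, if_pos hb]
    have ht : ((2 : Int) ^ k).toNat = 2 ^ k := by rw [h2]; exact Int.toNat_natCast _
    rw [ht]
    have hle : (2 ^ k) &&& (-m - 1).toNat ≤ 2 ^ k := Nat.and_le_left
    have hcast : ((↑(2 ^ k - (2 ^ k &&& (-m - 1).toNat)) : Int) = 2 ^ k) ↔
        (2 ^ k &&& (-m - 1).toNat = 0) := by
      rw [h2]; omega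
    rw [hcast]
    rw [Nat.and_comm, Nat.and_two_pow]
    have hp : 0 < 2 ^ k := Nat.two_pow_pos k
    cases h : (-m - 1).toNat.testBit k <;> simp <;> omega

-- a foldl whose step acts componentwise on a pair splits into two foldls
theorem foldl_pair_split (is : List Nat) (g1 g2 : List Int → Nat → List Int) (a b : List Int) :
    is.foldl (fun st i => (g1 st.1 i, g2 st.2 i)) (a, b) = (is.foldl g1 a, is.foldl g2 b) := by
  induction is generalizing a b with
  | nil => rfl
  | cons i is ih => simp [List.foldl, ih]

theorem foldl_set_length (is : List Nat) (P : Nat → Prop) [DecidablePred P] (f : Nat → Int) (l : List Int) :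
    (is.foldl (fun l i => if P i then l.set i (f i) else l) l).length = l.length := by
  induction is generalizing l with
  | nil => rfl
  | cons i is ih => simp only [List.foldl]; rw [ih]; split <;> simp

-- element j of A's conditional-set loop over range n
theorem foldl_range_set_get (n : Nat) (P : Nat → Prop) [DecidablePred P] (f : Nat → Int)
    (l : List Int) (j : Nat) :
    ((List.range n).foldl (fun l i => if P i then l.set i (f i) else l) l)[j]? =
      if j < n ∧ P j then (if j < l.length then some (f j) else none) else l[j]? := by
  induction n with
  | zero => simp
  | succ n ih =>
    rw [List.range_succ, List.foldl_append]
    simp only [List.foldl]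
    by_cases hP : P n
    · rw [if_pos hP, List.getElem?_set, foldl_set_length, ih]
      by_cases hj : n = j
      · subst hj
        simp [hP]
      · have hcond : (j < n + 1 ∧ P j) ↔ (j < n ∧ P j) :=
          ⟨fun ⟨h, p⟩ => ⟨by omega, p⟩, fun ⟨h, p⟩ => ⟨by omega, p⟩⟩
        rw [if_neg hj]
        simp only [hcond]
    · rw [if_neg hP, ih]
      have hcond : (j < n ∧ P j) ↔ (j < n + 1 ∧ P j) :=
        ⟨fun ⟨h, p⟩ => ⟨by omega, p⟩, fun ⟨h, p⟩ => by
          refine ⟨?_, p⟩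
          rcases (by omega : j < n ∨ j = n) with h' | h'
          · exact h'
          · exact absurd (h' ▸ p) hP⟩
      simp only [hcond]

-- element j of B's bit walk: index j is updated exactly when bit j of the mask is set
theorem pvBitWalk_get (v : Nat → Int) :
    ∀ m l (j : Nat), (pvBitWalk v m l)[j]? =
      if m.testBit j then (if j < l.length then some (v j) else none) else l[j]? := by
  intro m
  induction m using Nat.strong_induction_on with
  | _ m ih =>
    intro l j
    rw [pvBitWalk]
    by_cases h : m = 0
    · simp [h]
    · rw [dif_neg h]
      have hbl : 1 ≤ PySem.Int.bitLength (m : Int) := by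
        by_contra hc
        have := PySem.Int.lt_two_pow_bitLength (m : Int)
        rw [Int.natAbs_natCast] at this
        interval_cases (PySem.Int.bitLength (m : Int)) <;> omega
      set i := PySem.Int.bitLength (m : Int) - 1 with hi
      have h1 : 2 ^ i ≤ m := by
        have := PySem.Int.two_pow_bitLength_le (m : Int) (by exact_mod_cast h)
        rwa [Int.natAbs_natCast] at this
      have h2 : m < 2 ^ (i + 1) := by
        have := PySem.Int.lt_two_pow_bitLength (m : Int)
        rw [Int.natAbs_natCast] at this
        have he : PySem.Int.bitLength (m : Int) = i + 1 := by omega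
        rwa [he] at this
    -- m = 2^i + m' with m' < 2^i
      have hdec : m - 2 ^ i < m := by
        have : 0 < 2 ^ i := Nat.two_pow_pos _
        omega
      have hm' : m - 2 ^ i < 2 ^ i := by
        have h2' : 2 ^ (i + 1) = 2 * 2 ^ i := by ring
        omega
      have hsplit : m = 2 ^ i + (m - 2 ^ i) := by omega
      rw [ih _ hdec, List.length_set, List.getElem?_set]
      rcases lt_trichotomy j i with hj | hj | hj
      · have hb : m.testBit j = (m - 2 ^ i).testBit j := by
          conv_lhs => rw [hsplit]
          exact Nat.testBit_two_pow_add_gt hj _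
        rw [hb, if_neg (by omega : ¬ i = j)]
      · subst hj
        have hb0 : (m - 2 ^ i).testBit i = false := Nat.testBit_lt_two_pow hm'
        have hb1 : m.testBit i = true := by
          conv_lhs => rw [hsplit]
          rw [Nat.testBit_two_pow_add_eq, hb0]
          rfl
        rw [hb0, hb1, if_pos rfl]
        simp
      · have hb0 : (m - 2 ^ i).testBit j = false :=
          Nat.testBit_lt_two_pow (by
            have : (2 : Nat) ^ i ≤ 2 ^ j := Nat.pow_le_pow_right (by omega) (by omega)
            omega)
        have hb1 : m.testBit j = false :=
          Nat.testBit_lt_two_pow (by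
            have : (2 : Nat) ^ (i + 1) ≤ 2 ^ j := Nat.pow_le_pow_right (by omega) (by omega)
            omega)
        rw [hb0, hb1, if_neg (by omega : ¬ i = j)]

-- subtracting from the all-ones word flips every bit below n
theorem sub_from_ones_testBit : ∀ (n d j : Nat), d < 2 ^ n → j < n →
    ((2 ^ n - 1) - d).testBit j = !d.testBit j := by
  intro n
  induction n with
  | zero => omega
  | succ n ih =>
    intro d j hd hj
    have h2 : 2 ^ (n + 1) = 2 * 2 ^ n := by ring
    cases j with
    | zero =>
      rw [Nat.testBit_zero, Nat.testBit_zero]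
      have hp : 0 < 2 ^ n := Nat.two_pow_pos n
      rcases Nat.even_or_odd d with he | ho
      · have : d % 2 = 0 := Nat.even_iff.mp he
        simp [this]; omega
      · have : d % 2 = 1 := Nat.odd_iff.mp ho
        simp [this]; omega
    | succ j =>
      rw [Nat.testBit_succ, Nat.testBit_succ]
      have hdiv : ((2 ^ (n + 1) - 1) - d) / 2 = (2 ^ n - 1) - d / 2 := by omega
      rw [hdiv]
      exact ih (d / 2) j (by omega) (by omega)

-- the masked mask is below 2^n
theorem mask_toNat_lt (bm : Int) (n : Nat) :
    (PySem.Int.band bm ((2 : Int) ^ n - 1)).toNat < 2 ^ n := by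
  have hcast : ((2 : Int) ^ n - 1) = ((2 ^ n - 1 : Nat) : Int) := by
    rw [Nat.cast_sub Nat.one_le_two_pow]; push_cast; ring
  have ht : ((2 : Int) ^ n - 1).toNat = 2 ^ n - 1 := by rw [hcast]; exact Int.toNat_natCast _
  have hp : 0 < 2 ^ n := Nat.two_pow_pos n
  by_cases hm : 0 ≤ bm
  · rw [PySem.Int.band_of_nonneg hm (by rw [hcast]; exact Int.natCast_nonneg _), Int.toNat_natCast, ht]
    have : bm.toNat &&& (2 ^ n - 1) ≤ 2 ^ n - 1 := Nat.and_le_right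
    omega
  · rw [PySem.Int.band, if_neg hm, if_pos (by rw [hcast]; exact Int.natCast_nonneg _), Int.toNat_natCast, ht]
    omega

-- bit j of the masked mask is A's test, for j < n
theorem mask_testBit (bm : Int) (n j : Nat) (hj : j < n) :
    ((PySem.Int.band bm ((2 : Int) ^ n - 1)).toNat.testBit j = true) ↔
      PySem.Int.band bm ((2 : Int) ^ j) = 2 ^ j := by
  have hcast : ((2 : Int) ^ n - 1) = ((2 ^ n - 1 : Nat) : Int) := by
    rw [Nat.cast_sub Nat.one_le_two_pow]; push_cast; ring
  have ht : ((2 : Int) ^ n - 1).toNat = 2 ^ n - 1 := by rw [hcast]; exact Int.toNat_natCast _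
  rw [band_two_pow_iff]
  by_cases hm : 0 ≤ bm
  · rw [if_pos hm, PySem.Int.band_of_nonneg hm (by rw [hcast]; exact Int.natCast_nonneg _), Int.toNat_natCast, ht,
      Nat.testBit_land, Nat.testBit_two_pow_sub_one]
    simp [hj]
  · rw [if_neg hm, PySem.Int.band, if_neg hm, if_pos (by rw [hcast]; exact Int.natCast_nonneg _ : (0:Int) ≤ (2:Int) ^ n - 1),
      Int.toNat_natCast, ht]
    have hand : (2 ^ n - 1) &&& (-bm - 1).toNat = (-bm - 1).toNat % 2 ^ n := by
      rw [Nat.and_comm]; exact Nat.and_two_pow_sub_one_eq_mod _ n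
    rw [hand, sub_from_ones_testBit n ((-bm - 1).toNat % 2 ^ n) j
        (Nat.mod_lt _ (Nat.two_pow_pos n)) hj, Nat.testBit_mod_two_pow]
    simp [hj]

-- B's port, componentwise
theorem alt_get (input_shape begin end_ : List Int) (bm em : Int) (j : Nat)
    (es : List Int) (hes : es = (if PySem.List.pyGetD end_ (-1) 0 > PySem.List.pyGetD input_shape (-1) 0 then
      end_.dropLast ++ [PySem.List.pyGetD input_shape (-1) 0] else end_))
    (n : Nat) (hn : n = min (min input_shape.length begin.length) es.length) :
    update_begin_end_py_alt input_shape begin end_ bm em =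
      (pvBitWalk (fun _ => 0) (PySem.Int.band bm ((2 : Int) ^ n - 1)).toNat begin,
       pvBitWalk (fun i => input_shape.getD i 0) (PySem.Int.band em ((2 : Int) ^ n - 1)).toNat es) := by
  subst hes hn
  rfl

-- ===== VERDICT (by name: the statement is the Claim_ definition above) =====
theorem update_begin_end_py_spec : Claim_equal_update_begin_end_py := by
  intro input_shape begin end_ begin_mask end_mask _ _
  unfold Spec_update_begin_end_py update_begin_end_py
  set es := (if PySem.List.pyGetD end_ (-1) 0 > PySem.List.pyGetD input_shape (-1) 0 then
      end_.dropLast ++ [PySem.List.pyGetD input_shape (-1) 0] else end_) with hes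
  set n := min (min input_shape.length begin.length) es.length with hn
  rw [alt_get input_shape begin end_ begin_mask end_mask 0 es hes n hn]
  refine Eq.trans (foldl_pair_split (List.range n)
      (fun l i => if PySem.Int.band begin_mask ((2 : Int) ^ i) = (2 : Int) ^ i then l.set i 0 else l)
      (fun l i => if PySem.Int.band end_mask ((2 : Int) ^ i) = (2 : Int) ^ i then l.set i (input_shape.getD i 0) else l)
      begin es) ?_
  refine Prod.ext ?_ ?_
  · apply List.ext_getElem?
    intro j
    refine Eq.trans (foldl_range_set_get n
      (fun i => PySem.Int.band begin_mask ((2 : Int) ^ i) = (2 : Int) ^ i)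
      (fun _ => (0 : Int)) begin j) ?_
    rw [pvBitWalk_get]
    by_cases hjn : j < n
    · have hiff := mask_testBit begin_mask n j hjn
      by_cases hc : PySem.Int.band begin_mask ((2 : Int) ^ j) = (2 : Int) ^ j
      · have hb := hiff.mpr hc
        simp [hb, hc, hjn]
      · have hb : (PySem.Int.band begin_mask ((2 : Int) ^ n - 1)).toNat.testBit j = false := by
          cases hbool : (PySem.Int.band begin_mask ((2 : Int) ^ n - 1)).toNat.testBit j
          · rfl
          · exact absurd (hiff.mp hbool) hc
        simp [hb, hc, hjn]
    · have hb : (PySem.Int.band begin_mask ((2 : Int) ^ n - 1)).toNat.testBit j = false :=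
        Nat.testBit_lt_two_pow (by
          have h1 := mask_toNat_lt begin_mask n
          have h2 : (2 : Nat) ^ n ≤ 2 ^ j := Nat.pow_le_pow_right (by omega) (by omega)
          omega)
      simp [hb, hjn]
  · apply List.ext_getElem?
    intro j
    refine Eq.trans (foldl_range_set_get n
      (fun i => PySem.Int.band end_mask ((2 : Int) ^ i) = (2 : Int) ^ i)
      (fun i => input_shape.getD i 0) es j) ?_
    rw [pvBitWalk_get]
    by_cases hjn : j < n
    · have hiff := mask_testBit end_mask n j hjn
      by_cases hc : PySem.Int.band end_mask ((2 : Int) ^ j) = (2 : Int) ^ j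
      · have hb := hiff.mpr hc
        simp [hb, hc, hjn]
      · have hb : (PySem.Int.band end_mask ((2 : Int) ^ n - 1)).toNat.testBit j = false := by
          cases hbool : (PySem.Int.band end_mask ((2 : Int) ^ n - 1)).toNat.testBit j
          · rfl
          · exact absurd (hiff.mp hbool) hc
        simp [hb, hc, hjn]
    · have hb : (PySem.Int.band end_mask ((2 : Int) ^ n - 1)).toNat.testBit j = false :=
        Nat.testBit_lt_two_pow (by
          have h1 := mask_toNat_lt end_mask n
          have h2 : (2 : Nat) ^ n ≤ 2 ^ j := Nat.pow_le_pow_right (by omega) (by omega)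
          omega)
      simp [hb, hjn]
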